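-- pv_equiv track=rewrite | github.com/jwhunt19/aoc | 2023_python/day11/galaxy.py | warp_jump
-- ===== SOURCE A (Python) =====
-- from typing import List, Set, Tuple
--
-- def warp_jump(positions: List[int], empty_spaces: List[int]) -> int:
--     positions.sort()
--     space_crossed = 0
--     space_distance = 999999
--
--     for empty_space in empty_spaces:
--         if positions[0] < empty_space < positions[1]:
--             space_crossed += 1
--
--     return space_crossed * space_distance
-- ===== SOURCE B (Python) =====
-- # B: sort-then-binary-search range count instead of a linear scan over empty_spaces.
-- # Keeps A's in-place sort of `positions`; does not mutate `empty_spaces`.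
-- from typing import List
--
--
-- def _bisect_right(a: List[int], x: int) -> int:
--     lo, hi = 0, len(a)
--     while lo < hi:
--         mid = (lo + hi) // 2
--         if x < a[mid]:
--             hi = mid
--         else:
--             lo = mid + 1
--     return lo
--
--
-- def _bisect_left(a: List[int], x: int) -> int:
--     lo, hi = 0, len(a)
--     while lo < hi:
--         mid = (lo + hi) // 2
--         if a[mid] < x:
--             lo = mid + 1
--         else:
--             hi = mid
--     return lo
--
--
-- def warp_jump(positions: List[int], empty_spaces: List[int]) -> int:
--     positions.sort()
--     lo, hi = positions[0], positions[1]
--     es = sorted(empty_spaces)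
--     start = _bisect_right(es, lo)
--     between = _bisect_left(es[start:], hi)
--     return between * 999999
-- ===== Notes on version B (the rewrite author's own statement) =====
-- stated objective: alternative
-- what changed: Replaces A's linear scan of empty_spaces (testing each against the two smallest positions) by sorting empty_spaces once and counting the strict range (positions[0], positions[1]) with two hand-written binary searches (bisect_right, then bisect_left on the suffix).
-- outside the precondition, e.g. on warp_jump([5], [1]): A returns 0, B raises IndexError; on warp_jump([7], []): A returns 0, B raises IndexError
import Mathlib
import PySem

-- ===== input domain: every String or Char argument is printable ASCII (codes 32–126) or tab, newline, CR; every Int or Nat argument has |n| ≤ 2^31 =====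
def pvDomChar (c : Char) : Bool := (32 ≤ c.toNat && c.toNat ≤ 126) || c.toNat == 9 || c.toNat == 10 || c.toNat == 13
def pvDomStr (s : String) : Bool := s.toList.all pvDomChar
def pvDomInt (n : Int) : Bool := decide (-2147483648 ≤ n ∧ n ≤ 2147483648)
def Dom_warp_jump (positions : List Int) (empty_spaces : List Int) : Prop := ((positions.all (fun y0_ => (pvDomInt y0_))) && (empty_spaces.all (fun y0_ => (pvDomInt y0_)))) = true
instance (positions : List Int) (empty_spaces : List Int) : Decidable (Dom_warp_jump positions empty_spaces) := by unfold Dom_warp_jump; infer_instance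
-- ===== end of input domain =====

-- B replaces A's linear scan of empty_spaces by sort + two binary searches (same cost class, different algorithm).
-- A sorts `positions` in place (B does too); the equivalence proved here is about the RETURN value.


-- ===== PORT A =====
-- literal port: sort, then scan empty_spaces; `positions[0] < e < positions[1]` short-circuits
-- (positions[1] is only read when positions[0] < e); none = IndexError, excluded by Pre_.
def warp_jump (positions : List Int) (empty_spaces : List Int) : Int :=
  let ps := PySem.List.sorted positions (fun x => x) false
  let space_distance : Int := 999999
  let space_crossed : Int := empty_spaces.foldl (fun acc e =>
    match PySem.List.pyGet? ps 0 with
    | some p0 =>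
        if p0 < e then
          match PySem.List.pyGet? ps 1 with
          | some p1 => if e < p1 then acc + 1 else acc
          | none => acc   -- Python raises IndexError here; outside Pre_
        else acc
    | none => acc          -- Python raises IndexError here; outside Pre_
    ) 0
  space_crossed * space_distance

-- ===== PORT B =====
-- Source B's hand-written binary searches are exactly Python's bisect algorithm, which
-- PySem.List.bisectRight / bisectLeft implement (the same while lo < hi loop).
-- es[start:] with 0 ≤ start is List.drop start.
def warp_jump_alt (positions : List Int) (empty_spaces : List Int) : Int :=
  let ps := PySem.List.sorted positions (fun x => x) false
  match PySem.List.pyGet? ps 0, PySem.List.pyGet? ps 1 with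
  | some lo, some hi =>
      let es := PySem.List.sorted empty_spaces (fun x => x) false
      let start := PySem.List.bisectRight es lo
      let between := PySem.List.bisectLeft (es.drop start) hi
      (between : Int) * 999999
  | _, _ => 0              -- Python raises IndexError here; outside Pre_

-- ===== PRECONDITION & SPEC =====
-- Pre_ excludes positions with fewer than 2 elements: there B (and usually A) raises IndexError;
-- A still returns 0 on some of them (empty_spaces empty, or every empty space ≤ the single position)
-- only because the short-circuit never reaches positions[1] — B's algorithm naturally raises there.
def Pre_warp_jump (positions : List Int) (empty_spaces : List Int) : Prop :=
  2 ≤ positions.length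
instance (positions : List Int) (empty_spaces : List Int) : Decidable (Pre_warp_jump positions empty_spaces) := by unfold Pre_warp_jump; infer_instance
def pvWitness_warp_jump : List Int × List Int := ([3, 1], [2])
def Spec_warp_jump (positions : List Int) (empty_spaces : List Int) (out : Int) : Prop := out = warp_jump_alt positions empty_spaces
instance (positions : List Int) (empty_spaces : List Int) (out : Int) : Decidable (Spec_warp_jump positions empty_spaces out) := by unfold Spec_warp_jump; infer_instance

-- ===== CLAIM (what is proved, stated in full; the proofs are below) =====
def Claim_equal_warp_jump : Prop := ∀ (positions : List Int) (empty_spaces : List Int), Dom_warp_jump positions empty_spaces → Pre_warp_jump positions empty_spaces → Spec_warp_jump positions empty_spaces (warp_jump positions empty_spaces)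

-- ===== LEMMAS AND PROOFS =====

-- countP equals n when the first n positions satisfy P and the rest do not.
theorem countP_split (P : Int → Bool) (l : List Int) (n : Nat) (hn : n ≤ l.length)
    (h1 : ∀ (j : Nat) (hj : j < l.length), j < n → P l[j])
    (h2 : ∀ (j : Nat) (hj : j < l.length), n ≤ j → ¬ P l[j]) :
    l.countP P = n := by
  have htake : (l.take n).countP P = (l.take n).length := by
    apply List.countP_eq_length.mpr
    intro x hx
    obtain ⟨j, hj, hx⟩ := List.mem_iff_getElem.mp hx
    have hjn : j < n := by have := hj; simp [List.length_take] at this; omega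
    have hjl : j < l.length := by omega
    have hPj := h1 j hjl hjn
    rwa [← hx, List.getElem_take]
  have hdrop : (l.drop n).countP P = 0 := by
    apply List.countP_eq_zero.mpr
    intro x hx
    obtain ⟨j, hj, hx⟩ := List.mem_iff_getElem.mp hx
    have hjl : n + j < l.length := by have := hj; simp [List.length_drop] at this; omega
    have hPj := h2 (n + j) hjl (Nat.le_add_right _ _)
    rwa [← hx, List.getElem_drop]
  have := List.take_append_drop n l
  calc l.countP P = (l.take n ++ l.drop n).countP P := by rw [this]
    _ = (l.take n).countP P + (l.drop n).countP P := List.countP_append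
    _ = n := by rw [htake, hdrop, List.length_take]; omega

-- A's fold accumulates the count of elements strictly between lo and hi.
theorem foldl_count (lo hi : Int) (l : List Int) (acc : Int) :
    l.foldl (fun acc e => if lo < e then (if e < hi then acc + 1 else acc) else acc) acc
      = acc + (l.countP (fun e => decide (lo < e ∧ e < hi)) : Int) := by
  induction l generalizing acc with
  | nil => simp
  | cons a t ih =>
    simp only [List.foldl_cons, List.countP_cons, ih]
    by_cases h1 : lo < a <;> by_cases h2 : a < hi <;> simp [h1, h2] <;> omega

-- the bisect pair computes the between-count on the sorted list.
theorem bisect_between (lo hi : Int) (es : List Int)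
    (hs : es.Pairwise (fun a b => a ≤ b)) :
    ((PySem.List.bisectLeft (es.drop (PySem.List.bisectRight es lo)) hi : Nat) : Int)
      = (es.countP (fun e => decide (lo < e ∧ e < hi)) : Int) := by
  obtain ⟨hile, hlt, hge⟩ := PySem.List.bisectRight_spec es lo hs
  set i := PySem.List.bisectRight es lo with hi_def
  have hds : (es.drop i).Pairwise (fun a b => a ≤ b) :=
    hs.sublist (List.drop_sublist i es)
  obtain ⟨hmle, hmlt, hmge⟩ := PySem.List.bisectLeft_spec (es.drop i) hi hds
  set m := PySem.List.bisectLeft (es.drop i) hi with hm_def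
  have hdrop_gt : ∀ (j : Nat) (hj : j < (es.drop i).length), lo < (es.drop i)[j] := by
    intro j hj
    have hjl : i + j < es.length := by have := hj; simp [List.length_drop] at this; omega
    rw [List.getElem_drop]
    exact hge (i + j) hjl (Nat.le_add_right _ _)
  have hcd : (es.drop i).countP (fun e => decide (lo < e ∧ e < hi)) = m := by
    apply countP_split _ _ _ hmle
    · intro j hj hjm
      have hlt' := hmlt j hj hjm
      have hgt' := hdrop_gt j hj
      simp only [decide_eq_true_eq]
      exact ⟨hgt', hlt'⟩
    · intro j hj hjm
      have hge' := hmge j hj hjm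
      simp only [decide_eq_true_eq, not_and]
      intro _; omega
  have hct : (es.take i).countP (fun e => decide (lo < e ∧ e < hi)) = 0 := by
    apply List.countP_eq_zero.mpr
    intro x hx
    obtain ⟨j, hj, hx⟩ := List.mem_iff_getElem.mp hx
    have hji : j < i := by have := hj; simp [List.length_take] at this; omega
    have hjl : j < es.length := by omega
    have hle : es[j] ≤ lo := hlt j hjl hji
    have hxle : x ≤ lo := by rw [← hx, List.getElem_take]; exact hle
    simp only [decide_eq_true_eq, not_and]
    intro h; omega
  have hmain : es.countP (fun e => decide (lo < e ∧ e < hi)) = m := by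
    conv_lhs => rw [← List.take_append_drop i es]
    rw [List.countP_append, hct, hcd]; omega
  rw [hmain]

-- ===== VERDICT (by name: the statement is the Claim_ definition above) =====
theorem warp_jump_spec : Claim_equal_warp_jump := by
  intro positions empty_spaces _hdom hpre
  unfold Pre_warp_jump at hpre
  unfold Spec_warp_jump warp_jump warp_jump_alt
  set ps := PySem.List.sorted positions (fun x => x) false with hps
  have hlen : ps.length = positions.length := PySem.List.length_sorted _ _ _
  have h0 : 0 < ps.length := by omega
  have h1 : 1 < ps.length := by omega
  have hg0 : PySem.List.pyGet? ps 0 = some ps[0] := by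
    rw [PySem.List.pyGet?_zero, List.getElem?_eq_getElem h0]
  have hg1 : PySem.List.pyGet? ps 1 = some ps[1] := by
    have hcast : (1 : Int) = ((1 : Nat) : Int) := rfl
    rw [hcast, PySem.List.pyGet?_ofNat ps 1 h1]
  simp only [hg0, hg1]
  set es := PySem.List.sorted empty_spaces (fun x => x) false with hes
  have hsorted : es.Pairwise (fun a b => a ≤ b) := by
    simpa using PySem.List.sorted_pairwise empty_spaces (fun x => x)
  have hperm : es.Perm empty_spaces := PySem.List.sorted_perm _ _ _
  rw [foldl_count ps[0] ps[1] empty_spaces 0]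
  rw [← hperm.countP_eq]
  rw [← bisect_between ps[0] ps[1] es hsorted]
  ring
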